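-- pv_equiv track=rewrite | github.com/shz173/IR_project | searchmethod1.py | compute_match_score
-- ===== SOURCE A (Python) =====
-- def compute_match_score(preprocessed_query, dictionary_term, posting):
--     docId_score = {} # {docId:score}
--     for word in preprocessed_query:
--         if word not in dictionary_term.keys():
--             return {}
--         posting_idx = dictionary_term[word]
--         occur_dic = posting[int(posting_idx)]
--         for docId in occur_dic.keys():
--             if docId not in docId_score.keys():
--                 docId_score[docId] = 0
--             docId_score[docId] += 1
--     return docId_score
-- ===== SOURCE B (Python) =====
-- def compute_match_score(preprocessed_query, dictionary_term, posting):
--     # any query word absent from the dictionary means no match at all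
--     if any(word not in dictionary_term for word in preprocessed_query):
--         return {}
--     # flatten every matched posting's docIds (with repetitions across words),
--     # then build the result non-incrementally: first-occurrence order, total count
--     flat = [docId
--             for word in preprocessed_query
--             for docId in posting[int(dictionary_term[word])]]
--     return {docId: flat.count(docId) for docId in dict.fromkeys(flat)}
-- ===== Notes on version B (the rewrite author's own statement) =====
-- stated objective: alternative
-- what changed: A maintains a mutable score dict, incrementing it docId by docId inside the query loop with an early return; B has no running accumulator at all: it validates the query, flattens all matched docIds into one list, and builds the result in one shot as a comprehension over dict.fromkeys(flat) paired with flat.count (trading A's linear incremental counting for a quadratic but stateless dedup-and-count).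
import Mathlib
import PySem

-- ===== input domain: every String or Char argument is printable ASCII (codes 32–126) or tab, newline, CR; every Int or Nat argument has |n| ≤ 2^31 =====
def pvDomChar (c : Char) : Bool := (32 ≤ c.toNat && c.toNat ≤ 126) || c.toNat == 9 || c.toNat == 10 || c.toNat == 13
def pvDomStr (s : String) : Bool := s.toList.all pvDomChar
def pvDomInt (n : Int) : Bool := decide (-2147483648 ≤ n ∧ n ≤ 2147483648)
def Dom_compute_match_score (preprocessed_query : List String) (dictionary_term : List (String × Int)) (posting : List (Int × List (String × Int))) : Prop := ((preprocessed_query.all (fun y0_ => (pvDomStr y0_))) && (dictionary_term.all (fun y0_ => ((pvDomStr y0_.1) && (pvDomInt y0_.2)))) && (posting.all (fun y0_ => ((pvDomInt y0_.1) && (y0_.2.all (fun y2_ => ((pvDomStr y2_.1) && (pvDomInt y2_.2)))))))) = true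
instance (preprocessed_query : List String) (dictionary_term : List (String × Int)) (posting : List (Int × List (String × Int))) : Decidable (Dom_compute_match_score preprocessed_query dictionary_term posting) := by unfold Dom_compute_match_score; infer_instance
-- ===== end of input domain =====

-- B drops A's mutable running-score dict entirely: validate, flatten all matched docIds, then
-- build the result in one shot as dedup-then-count; equal return values on Pre_ (no mutation).

-- shared dict primitives of the two Pythons: first-match association-list lookup, and
-- iteration over a Python dict's keys (first occurrences, deduplicated)
def pvLookupTerm (dictionary_term : List (String × Int)) (w : String) : Option Int :=
  (dictionary_term.find? (fun pr => pr.1 == w)).map (·.2)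
def pvLookupPost (posting : List (Int × List (String × Int))) (i : Int) : Option (List (String × Int)) :=
  (posting.find? (fun pr => pr.1 == i)).map (·.2)
def pvKeysOf (occ : List (String × Int)) : List String :=
  PySem.List.dedup (occ.map (·.1))

-- ===== PORT A =====
def pvGoA (dictionary_term : List (String × Int)) (posting : List (Int × List (String × Int))) :
    List String → PySem.Dict String Int → List (String × Int)
  | [], docId_score => docId_score.items
  | word :: rest, docId_score =>
    match pvLookupTerm dictionary_term word with
    | none => []                                       -- 'return {}'
    | some posting_idx =>
      match pvLookupPost posting posting_idx with
      | none => []                                     -- Python raises KeyError here; excluded by Pre_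
      | some occur_dic =>
        pvGoA dictionary_term posting rest
          ((pvKeysOf occur_dic).foldl
            (fun s docId =>
              let s1 := if s.contains docId then s else s.insert docId 0
              s1.insert docId (s1.getD docId 0 + 1)) docId_score)

def compute_match_score (preprocessed_query : List String) (dictionary_term : List (String × Int)) (posting : List (Int × List (String × Int))) : List (String × Int) :=
  pvGoA dictionary_term posting preprocessed_query PySem.Dict.empty

-- ===== PORT B =====
def compute_match_score_alt (preprocessed_query : List String) (dictionary_term : List (String × Int)) (posting : List (Int × List (String × Int))) : List (String × Int) :=
  if preprocessed_query.any (fun w => (pvLookupTerm dictionary_term w).isNone) then []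
  else
    let flat := preprocessed_query.flatMap (fun w =>
      pvKeysOf ((pvLookupPost posting ((pvLookupTerm dictionary_term w).getD 0)).getD []))
    (PySem.List.dedup flat).map (fun docId => (docId, (flat.count docId : Int)))

-- ===== PRECONDITION & SPEC =====
-- Pre_ excludes exactly the inputs where A raises KeyError: some query word whose whole prefix
-- (itself included) is present in dictionary_term has a posting index absent from posting.
def Pre_compute_match_score (preprocessed_query : List String) (dictionary_term : List (String × Int)) (posting : List (Int × List (String × Int))) : Prop :=
  ∀ i < preprocessed_query.length,
    (∀ j ≤ i, (pvLookupTerm dictionary_term (preprocessed_query.getD j "")).isSome = true) →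
    ((pvLookupTerm dictionary_term (preprocessed_query.getD i "")).bind (pvLookupPost posting)).isSome = true
instance (preprocessed_query : List String) (dictionary_term : List (String × Int)) (posting : List (Int × List (String × Int))) : Decidable (Pre_compute_match_score preprocessed_query dictionary_term posting) := by unfold Pre_compute_match_score; infer_instance
def pvWitness_compute_match_score : List String × (List (String × Int)) × (List (Int × List (String × Int))) :=
  (["a", "b"], [("a", 0), ("b", 1)], [(0, [("d1", 3)]), (1, [("d1", 1), ("d2", 2)])])

def Spec_compute_match_score (preprocessed_query : List String) (dictionary_term : List (String × Int)) (posting : List (Int × List (String × Int))) (out : List (String × Int)) : Prop := out = compute_match_score_alt preprocessed_query dictionary_term posting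
instance (preprocessed_query : List String) (dictionary_term : List (String × Int)) (posting : List (Int × List (String × Int))) (out : List (String × Int)) : Decidable (Spec_compute_match_score preprocessed_query dictionary_term posting out) := by unfold Spec_compute_match_score; infer_instance

-- ===== CLAIM (what is proved, stated in full; the proofs are below) =====
def Claim_equal_compute_match_score : Prop := ∀ (preprocessed_query : List String) (dictionary_term : List (String × Int)) (posting : List (Int × List (String × Int))), Dom_compute_match_score preprocessed_query dictionary_term posting → Pre_compute_match_score preprocessed_query dictionary_term posting → Spec_compute_match_score preprocessed_query dictionary_term posting (compute_match_score preprocessed_query dictionary_term posting)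

-- ===== LEMMAS AND PROOFS =====

-- A's two-step dict update ('initialise to 0 if absent, then += 1') is the standard counter step
lemma pvStepA_eq (s : PySem.Dict String Int) (k : String) :
    (let s1 := if s.contains k then s else s.insert k 0
     s1.insert k (s1.getD k 0 + 1)) = s.insert k (s.getD k 0 + 1) := by
  by_cases h : s.contains k = true
  · simp [h]
  · simp only [Bool.not_eq_true] at h
    simp [h, PySem.Dict.insert_insert_self, PySem.Dict.getD_insert_self]
    rw [PySem.Dict.getD_of_not_contains s h (d0 := 0)]
    norm_num

-- loop invariant: under Pre_, A's interleaved loop from any score dict equals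
-- check-everything, then fold the counter step over the flattened docId sequence
lemma pvGoA_eq (dictionary_term : List (String × Int)) (posting : List (Int × List (String × Int)))
    (ws : List String) (score : PySem.Dict String Int)
    (hpre : ∀ i < ws.length,
      (∀ j ≤ i, (pvLookupTerm dictionary_term (ws.getD j "")).isSome = true) →
      ((pvLookupTerm dictionary_term (ws.getD i "")).bind (pvLookupPost posting)).isSome = true) :
    pvGoA dictionary_term posting ws score =
      if ws.all (fun w => (pvLookupTerm dictionary_term w).isSome) then
        ((ws.flatMap (fun w =>
            pvKeysOf ((pvLookupPost posting ((pvLookupTerm dictionary_term w).getD 0)).getD []))).foldl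
          (fun s docId => s.insert docId (s.getD docId 0 + 1)) score).items
      else [] := by
  induction ws generalizing score with
  | nil => simp [pvGoA]
  | cons w ws ih =>
    cases h1 : pvLookupTerm dictionary_term w with
    | none =>
      simp [pvGoA, h1]
    | some idx =>
      have h0 : ((pvLookupTerm dictionary_term ((w :: ws).getD 0 "")).bind (pvLookupPost posting)).isSome = true := by
        apply hpre 0 (by simp)
        intro j hj
        interval_cases j
        simp [h1]
      rw [show (w :: ws).getD 0 "" = w from rfl, h1] at h0
      simp only [Option.bind_some] at h0
      cases h2 : pvLookupPost posting idx with
      | none => rw [h2] at h0; simp at h0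
      | some occ =>
        have hstep : (fun (s : PySem.Dict String Int) (docId : String) =>
            let s1 := if s.contains docId then s else s.insert docId 0
            s1.insert docId (s1.getD docId 0 + 1)) =
            (fun s docId => s.insert docId (s.getD docId 0 + 1)) := by
          funext s k; exact pvStepA_eq s k
        have hpre' : ∀ i < ws.length,
            (∀ j ≤ i, (pvLookupTerm dictionary_term (ws.getD j "")).isSome = true) →
            ((pvLookupTerm dictionary_term (ws.getD i "")).bind (pvLookupPost posting)).isSome = true := by
          intro i hi hall
          have := hpre (i + 1) (by simpa using Nat.succ_lt_succ hi)
          simp only [List.getD_cons_succ] at this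
          apply this
          intro j hj
          cases j with
          | zero => simp [h1]
          | succ j => simp only [List.getD_cons_succ]; exact hall j (by omega)
        rw [show pvGoA dictionary_term posting (w :: ws) score =
            pvGoA dictionary_term posting ws
              ((pvKeysOf occ).foldl
                (fun s docId =>
                  let s1 := if s.contains docId then s else s.insert docId 0
                  s1.insert docId (s1.getD docId 0 + 1)) score) from by
          simp [pvGoA, h1, h2]]
        rw [hstep, ih _ hpre']
        simp only [List.all_cons, h1, Option.isSome_some, Bool.true_and, List.flatMap_cons,
          List.foldl_append, Option.getD_some, h2]

-- ===== VERDICT (by name: the statement is the Claim_ definition above) =====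
theorem compute_match_score_spec : Claim_equal_compute_match_score := by
  intro q d p _hdom hpre
  unfold Spec_compute_match_score compute_match_score compute_match_score_alt
  rw [pvGoA_eq d p q PySem.Dict.empty hpre]
  rw [PySem.Dict.foldl_insert_getD_add_one_eq_counter, PySem.Dict.items_counter]
  rcases hall : q.all (fun w => (pvLookupTerm d w).isSome) with _ | _
  · have : q.any (fun w => (pvLookupTerm d w).isNone) = true := by
      simp only [List.all_eq_false] at hall
      rcases hall with ⟨w, hw, hns⟩
      exact List.any_eq_true.mpr ⟨w, hw, by simpa using hns⟩
    simp [this]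
  · have : q.any (fun w => (pvLookupTerm d w).isNone) = false := by
      simp only [List.any_eq_false]
      intro w hw
      have := List.all_eq_true.mp hall w hw
      simp [Option.isNone_eq_false_iff, Option.isSome_iff_ne_none] at this ⊢
      exact this
    simp [this]
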